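-- pv_equiv track=rewrite | github.com/ulyana-3107/Studying | Recursion/nails_nd_ropes.py | ropes
-- ===== SOURCE A (Python) =====
-- def ropes(coords: list, n) -> int:  # N - length of nails
--     """
--     defines minimum possible length of ropes needed to link all nails
--     :param coords: list with digits, where each digit - coordinate, coord(i - 1) < coord(i) < coord(i + 1), i - index
--     :param n: number of nails
--     :return: minimum rope length
--     """
--     # dictionary, key - name of nail(digit), value - the coordinate of the nail
--     nail_coord = {i + 1: coords[i] for i in range(n)}  # O(N)
--     # list with booleans, False - nail has no rope attached, True - on the contrary
--     nails_with_rope = [False for _ in range(n)]  # O(N)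
--     # list with names of nails which have no rope attached(free), rate - current length of rope used
--     nails_free, rate = [i for i in range(1, n + 1)], 0  # O(N)
--     while not all(nails_with_rope):  # O(N//2) -> O(N)
--         nail = nails_free[0]
--         nails_free.remove(nail)  # O(1) так как всегда из свободных берется крайний
--         # if nail has both left and right neighbour
--         if nail in range(2, n):
--             # length of the rope needed to use left nail/right nail
--             len1, len2 = nail_coord[nail] - nail_coord[nail - 1], nail_coord[nail + 1] - nail_coord[nail]
--             a, b, c_ = len1 < len2, len2 < len1, len1 == len2
--             if a:
--                 c, d, nail_ = nail - 1, nail - 2, nail - 1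
--                 rate += len1
--             else:
--                 c, d, nail_ = nail - 1, nail, nail + 1
--                 rate += len2
--             if nail_ in nails_free:  # O(2) -> O(1) - так как nail_ - это всегда сосед и при проверке на вхождение (перебор)
--                 # нужный элемент будет максимум на 2м месте.
--                 nails_free.remove(nail_)  # O(2) -> O(1) - тоже самое - максимум 2й по счету элемент
--             nails_with_rope[c], nails_with_rope[d] = True, True
--         else:
--             # if nail has only left/right nail neighbour
--             if nail == 1:
--                 rate += (nail_coord[nail + 1] - nail_coord[nail])
--                 a, b = nail, nail - 1
--                 nail_ = nail + 1
--             else: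
--                 rate += (nail_coord[nail] - nail_coord[nail - 1])
--                 a, b = nail - 1, nail - 2
--                 nail_ = nail - 1
--             nails_with_rope[a], nails_with_rope[b] = True, True
--             if nail_ in nails_free:  # O(2) -> O(1)
--                 nails_free.remove(nail_)  # O(2) -> O(1)
--     return round(rate, 2)
-- ===== SOURCE B (Python) =====
-- def ropes(coords: list, n) -> int:
--     """Single left-to-right pointer pass: O(N) instead of A's O(N^2) all()/remove scans."""
--     if n < 2:
--         return 0
--     rate = coords[1] - coords[0]
--     k = 3  # 1-based name of the leftmost nail not yet covered
--     while k < n: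
--         len1 = coords[k - 1] - coords[k - 2]
--         len2 = coords[k] - coords[k - 1]
--         if len1 < len2:
--             rate += len1
--             k += 1
--         else:
--             rate += len2
--             k += 2
--     if k == n:
--         rate += coords[n - 1] - coords[n - 2]
--     return rate
-- ===== Notes on version B (the rewrite author's own statement) =====
-- stated objective: faster
-- what changed: Replaced A's dict + boolean list + free-list machinery, whose loop re-scans all() and calls list.remove each iteration, by a single left-to-right pointer pass that adds the cheaper neighbouring gap and advances the pointer by 1 or 2.
-- crash fix: For n == 1 A raises (KeyError looking up the nonexistent nail 2, or IndexError on empty coords); B returns 0 since a single nail needs no rope. — e.g. on ropes([5], 1): A raises KeyError, B returns 0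
import Mathlib
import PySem

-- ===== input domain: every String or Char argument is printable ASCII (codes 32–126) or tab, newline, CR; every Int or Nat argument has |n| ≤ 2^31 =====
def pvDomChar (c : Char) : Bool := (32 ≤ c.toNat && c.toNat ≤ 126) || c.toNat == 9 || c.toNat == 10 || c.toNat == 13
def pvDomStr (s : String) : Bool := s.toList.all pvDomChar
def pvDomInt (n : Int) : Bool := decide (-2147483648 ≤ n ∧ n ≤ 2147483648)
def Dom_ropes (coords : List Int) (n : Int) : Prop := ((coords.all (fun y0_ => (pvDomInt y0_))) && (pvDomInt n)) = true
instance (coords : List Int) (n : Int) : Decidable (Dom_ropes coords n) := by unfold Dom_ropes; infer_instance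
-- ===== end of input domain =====

-- B replaces A's dict + bool-list + free-list loop (all()/remove rescans, O(n^2)) by one
-- left-to-right pointer pass (O(n), measured faster); A raises on n = 1 and on n > len(coords):
-- those inputs are outside Pre_.


-- ===== PORT A =====
-- 'if nail_ in nails_free: nails_free.remove(nail_)'
def pyMaybeRemove (l : List Int) (v : Int) : List Int :=
  if l.contains v then (PySem.List.remove? l v).getD l else l

-- termination lemma for the while loop (cited in decreasing_by)
theorem pyMaybeRemove_length_le (l : List Int) (v : Int) :
    (pyMaybeRemove l v).length ≤ l.length := by
  unfold pyMaybeRemove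
  split
  · rename_i h
    have hv : v ∈ l := by simpa using h
    rw [PySem.List.remove?_eq_some_erase l v hv]
    simpa using List.length_erase_le (l := l) (a := v)
  · exact Nat.le_refl _

-- nail_coord = {i + 1: coords[i] for i in range(n)}  (pyGetD: coords[i] is in range for all
-- i < n under Pre_; outside Pre_ Python raises IndexError here)
def ncDict (coords : List Int) (n : Int) : PySem.Dict Int Int :=
  (PySem.List.pyRange 0 n 1).foldl
    (fun d i => d.insert (i + 1) (PySem.List.pyGetD coords i 0)) PySem.Dict.empty

-- the 'while not all(nails_with_rope)' loop; state = (nails_with_rope, nails_free, rate).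
-- free = [] with the loop condition true is Python's IndexError at nails_free[0] — unreachable
-- under Pre_ (rate returned there is a dummy). Dict lookups use getD 0: a missing key is
-- Python's KeyError, which under Pre_ never happens (n = 1 is excluded).
def ropesLoop (nc : PySem.Dict Int Int) (n : Int)
    (withRope : List Bool) (free : List Int) (rate : Int) : Int :=
  if withRope.all (fun b => b) then rate
  else
    match free with
    | [] => rate
    | nail :: rest =>
      if 2 ≤ nail ∧ nail < n then
        -- len1, len2 inlined
        if nc.getD nail 0 - nc.getD (nail - 1) 0 < nc.getD (nail + 1) 0 - nc.getD nail 0 then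
          ropesLoop nc n
            (PySem.List.pySetD (PySem.List.pySetD withRope (nail - 1) true) (nail - 2) true)
            (pyMaybeRemove rest (nail - 1)) (rate + (nc.getD nail 0 - nc.getD (nail - 1) 0))
        else
          ropesLoop nc n
            (PySem.List.pySetD (PySem.List.pySetD withRope (nail - 1) true) nail true)
            (pyMaybeRemove rest (nail + 1)) (rate + (nc.getD (nail + 1) 0 - nc.getD nail 0))
      else
        if nail = 1 then
          ropesLoop nc n
            (PySem.List.pySetD (PySem.List.pySetD withRope nail true) (nail - 1) true)
            (pyMaybeRemove rest (nail + 1)) (rate + (nc.getD (nail + 1) 0 - nc.getD nail 0))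
        else
          ropesLoop nc n
            (PySem.List.pySetD (PySem.List.pySetD withRope (nail - 1) true) (nail - 2) true)
            (pyMaybeRemove rest (nail - 1)) (rate + (nc.getD nail 0 - nc.getD (nail - 1) 0))
  termination_by free.length
  decreasing_by
    all_goals
      exact Nat.lt_succ_of_le (pyMaybeRemove_length_le _ _)

-- round(rate, 2) on an int is the int itself
def ropes (coords : List Int) (n : Int) : Int :=
  ropesLoop (ncDict coords n) n
    ((PySem.List.pyRange 0 n 1).map (fun _ => false))
    (PySem.List.pyRange 1 (n + 1) 1) 0

-- ===== PORT B =====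
def ropesAltLoop (coords : List Int) (n : Int) (k : Int) (rate : Int) : Int :=
  if h : k < n then
    -- len1, len2 inlined
    if PySem.List.pyGetD coords (k - 1) 0 - PySem.List.pyGetD coords (k - 2) 0
        < PySem.List.pyGetD coords k 0 - PySem.List.pyGetD coords (k - 1) 0 then
      ropesAltLoop coords n (k + 1)
        (rate + (PySem.List.pyGetD coords (k - 1) 0 - PySem.List.pyGetD coords (k - 2) 0))
    else
      ropesAltLoop coords n (k + 2)
        (rate + (PySem.List.pyGetD coords k 0 - PySem.List.pyGetD coords (k - 1) 0))
  else if k = n then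
    rate + (PySem.List.pyGetD coords (n - 1) 0 - PySem.List.pyGetD coords (n - 2) 0)
  else rate
  termination_by (n - k).toNat
  decreasing_by
    · omega
    · omega

def ropes_alt (coords : List Int) (n : Int) : Int :=
  if n < 2 then 0
  else ropesAltLoop coords n 3 (PySem.List.pyGetD coords 1 0 - PySem.List.pyGetD coords 0 0)

-- ===== PRECONDITION & SPEC =====
-- Pre_ excludes exactly the inputs where A raises: n = 1 (KeyError on nail 2, or IndexError
-- on empty coords) and 2 ≤ n > len(coords) (IndexError building the dict).
def Pre_ropes (coords : List Int) (n : Int) : Prop :=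
  n ≤ 0 ∨ (2 ≤ n ∧ n ≤ coords.length)
instance (coords : List Int) (n : Int) : Decidable (Pre_ropes coords n) := by
  unfold Pre_ropes; infer_instance

def pvWitness_ropes : List Int × Int := ([1, 3, 6], 3)

-- For n == 1 A raises (KeyError looking up the nonexistent nail 2, or IndexError on empty
-- coords); B returns 0 since a single nail needs no rope.
def Raises_ropes (coords : List Int) (n : Int) : Prop := n = 1
instance (coords : List Int) (n : Int) : Decidable (Raises_ropes coords n) := by
  unfold Raises_ropes; infer_instance
def pvRaiseWitness_ropes : List Int × Int := ([5], 1)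
def pvRaiseWitnessOut_ropes : Int := 0

def Spec_ropes (coords : List Int) (n : Int) (out : Int) : Prop := out = ropes_alt coords n
instance (coords : List Int) (n : Int) (out : Int) : Decidable (Spec_ropes coords n out) := by
  unfold Spec_ropes; infer_instance

-- ===== CLAIM (what is proved, stated in full; the proofs are below) =====
def Claim_equal_ropes : Prop := ∀ (coords : List Int) (n : Int), Dom_ropes coords n →
  Pre_ropes coords n → Spec_ropes coords n (ropes coords n)

def Claim_raises_ropes : Prop :=
  (∀ (coords : List Int) (n : Int), Dom_ropes coords n → Raises_ropes coords n →
    ¬ Pre_ropes coords n) ∧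
  (Dom_ropes (pvRaiseWitness_ropes.1) (pvRaiseWitness_ropes.2) ∧
    Raises_ropes (pvRaiseWitness_ropes.1) (pvRaiseWitness_ropes.2) ∧
    ropes_alt (pvRaiseWitness_ropes.1) (pvRaiseWitness_ropes.2) = pvRaiseWitnessOut_ropes)

-- ===== LEMMAS AND PROOFS =====

-- first m entries true, rest false: the shape of nails_with_rope throughout the loop
def Wlist (nn : Nat) (m : Int) : List Bool :=
  (List.range nn).map (fun i : Nat => decide ((i : Int) < m))

theorem ncDict_getD (coords : List Int) (m : Nat) (j : Int)
    (h1 : 1 ≤ j) (h2 : j ≤ (m : Int)) :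
    (ncDict coords (m : Int)).getD j 0 = PySem.List.pyGetD coords (j - 1) 0 := by
  induction m with
  | zero => simp at h2; omega
  | succ p ih =>
    have hc : ((p + 1 : Nat) : Int) = (p : Int) + 1 := by push_cast; ring
    unfold ncDict
    rw [hc, PySem.List.pyRange_one_succ_right (by positivity), List.foldl_append]
    simp only [List.foldl_cons, List.foldl_nil]
    rw [PySem.Dict.getD_insert]
    split
    · rename_i he
      congr 1
      omega
    · rename_i he
      exact ih (by omega)

theorem Wlist_all (nn : Nat) (m : Int) (hm : 0 ≤ m) :
    (Wlist nn m).all (fun b => b) = decide ((nn : Int) ≤ m) := by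
  unfold Wlist
  rcases Int.lt_or_le m (nn : Int) with h | h
  · rw [decide_eq_false (by omega : ¬ (nn : Int) ≤ m), List.all_eq_false]
    refine ⟨_, List.mem_map.2 ⟨nn - 1, List.mem_range.2 (by omega), rfl⟩, ?_⟩
    simp only [Bool.not_eq_true, decide_eq_false_iff_not]
    push_cast
    omega
  · rw [decide_eq_true h, List.all_eq_true]
    intro b hb
    obtain ⟨i, hi, rfl⟩ := List.mem_map.1 hb
    have hilt := List.mem_range.1 hi
    rw [decide_eq_true_eq]
    omega

theorem pySetD_Wlist (nn : Nat) (m j : Int) (h0 : 0 ≤ j) (hj : j < (nn : Int))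
    (hjm : j ≤ m) (hmj : m ≤ j + 1) :
    PySem.List.pySetD (Wlist nn m) j true = Wlist nn (j + 1) := by
  rw [PySem.List.pySetD_of_nonneg (Wlist nn m) true h0]
  unfold Wlist
  apply List.ext_getElem
  · simp
  · intro i hi1 hi2
    simp only [List.length_set, List.length_map, List.length_range] at hi1 hi2
    simp only [List.getElem_set, List.getElem_map, List.getElem_range]
    split
    · rw [eq_comm, decide_eq_true_eq]
      omega
    · rename_i he
      rw [decide_eq_decide]
      omega

theorem pySetD_Wlist_noop (nn : Nat) (m j : Int) (h0 : 0 ≤ j) (hj : j < m) :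
    PySem.List.pySetD (Wlist nn m) j true = Wlist nn m := by
  rw [PySem.List.pySetD_of_nonneg (Wlist nn m) true h0]
  unfold Wlist
  apply List.ext_getElem
  · simp
  · intro i hi1 hi2
    simp only [List.length_set, List.length_map, List.length_range] at hi1 hi2
    simp only [List.getElem_set, List.getElem_map, List.getElem_range]
    split
    · rw [eq_comm, decide_eq_true_eq]
      omega
    · rfl

theorem pySetD_Wlist_init (nn : Nat) (h : 2 ≤ nn) :
    PySem.List.pySetD (PySem.List.pySetD (Wlist nn 0) 1 true) 0 true = Wlist nn 2 := by
  rw [PySem.List.pySetD_of_nonneg _ true (by omega : (0:Int) ≤ 1),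
      PySem.List.pySetD_of_nonneg _ true (by omega : (0:Int) ≤ 0)]
  unfold Wlist
  apply List.ext_getElem
  · simp
  · intro i hi1 hi2
    simp only [List.length_set, List.length_map, List.length_range] at hi1 hi2
    simp only [List.getElem_set, List.getElem_map, List.getElem_range]
    split
    · rw [eq_comm, decide_eq_true_eq]; omega
    · split
      · rw [eq_comm, decide_eq_true_eq]
        rename_i h0 h1
        omega
      · rename_i h0 h1
        rw [decide_eq_decide]
        omega

theorem pyMaybeRemove_nil (v : Int) : pyMaybeRemove [] v = [] := by
  simp [pyMaybeRemove]

theorem pyMaybeRemove_not_mem (l : List Int) (v : Int) (h : v ∉ l) :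
    pyMaybeRemove l v = l := by
  unfold pyMaybeRemove
  rw [if_neg]
  simpa using h

theorem pyMaybeRemove_range_head (a b : Int) (h : a < b) :
    pyMaybeRemove (PySem.List.pyRange a b 1) a = PySem.List.pyRange (a + 1) b 1 := by
  rw [PySem.List.pyRange_one_cons h]
  unfold pyMaybeRemove
  rw [if_pos (by simp), PySem.List.remove?_cons_self]
  rfl

theorem loop_eq (coords : List Int) (n : Int) (h2 : 2 ≤ n) :
    ∀ (f : Nat) (k rate : Int), 3 ≤ k → (n - k).toNat ≤ f →
      ropesLoop (ncDict coords n) n (Wlist n.toNat (k - 1))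
        (PySem.List.pyRange k (n + 1) 1) rate = ropesAltLoop coords n k rate := by
  have hnt : ((n.toNat : Nat) : Int) = n := Int.toNat_of_nonneg (by omega)
  have hget : ∀ j : Int, 1 ≤ j → j ≤ n →
      (ncDict coords n).getD j 0 = PySem.List.pyGetD coords (j - 1) 0 := by
    intro j hj1 hj2
    calc (ncDict coords n).getD j 0
        = (ncDict coords ((n.toNat : Nat) : Int)).getD j 0 := by rw [hnt]
      _ = _ := ncDict_getD coords n.toNat j hj1 (by omega)
  have hend : ∀ (k rate : Int), n < k →
      ropesLoop (ncDict coords n) n (Wlist n.toNat (k - 1))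
        (PySem.List.pyRange k (n + 1) 1) rate = rate := by
    intro k rate hk
    rw [PySem.List.pyRange_one_eq_nil (by omega), ropesLoop,
        Wlist_all _ _ (by omega), hnt, decide_eq_true (by omega : n ≤ k - 1), if_pos rfl]
  have hlast : ∀ (rate : Int),
      ropesLoop (ncDict coords n) n (Wlist n.toNat (n - 1))
        (PySem.List.pyRange n (n + 1) 1) rate
      = rate + (PySem.List.pyGetD coords (n - 1) 0 - PySem.List.pyGetD coords (n - 2) 0) := by
    intro rate
    rw [PySem.List.pyRange_one_singleton, ropesLoop,
        Wlist_all _ _ (by omega), hnt, decide_eq_false (by omega : ¬ n ≤ n - 1), if_neg (by simp)]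
    rw [if_neg (by omega : ¬ (2 ≤ n ∧ n < n)), if_neg (by omega : ¬ n = 1)]
    rw [pySetD_Wlist n.toNat (n - 1) (n - 1) (by omega) (by omega) le_rfl (by omega),
        pySetD_Wlist_noop n.toNat (n - 1 + 1) (n - 2) (by omega) (by omega),
        pyMaybeRemove_nil]
    have hW : n - 1 + 1 = n := by ring
    rw [hW, ropesLoop, Wlist_all _ _ (by omega), hnt, decide_eq_true le_rfl, if_pos rfl]
    rw [hget n (by omega) le_rfl, hget (n - 1) (by omega) (by omega)]
    have : n - 1 - 1 = n - 2 := by ring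
    rw [this]
  intro f
  induction f with
  | zero =>
    intro k rate hk hf
    have hkn : n ≤ k := by omega
    rcases eq_or_lt_of_le hkn with heq | hlt
    · rw [← heq, hlast rate, ropesAltLoop, dif_neg (by omega), if_pos rfl]
    · rw [hend k rate hlt, ropesAltLoop, dif_neg (by omega), if_neg (by omega)]
  | succ p ih =>
    intro k rate hk hf
    rcases lt_trichotomy k n with hkn | hkn | hkn
    · -- interior nail k
      rw [PySem.List.pyRange_one_cons (by omega : k < n + 1), ropesLoop,
          Wlist_all _ _ (by omega), hnt, decide_eq_false (by omega : ¬ n ≤ k - 1),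
          if_neg (by simp), if_pos ⟨by omega, hkn⟩]
      rw [hget k (by omega) (by omega), hget (k - 1) (by omega) (by omega),
          hget (k + 1) (by omega) (by omega)]
      have e1 : k - 1 - 1 = k - 2 := by ring
      have e2 : k + 1 - 1 = k := by ring
      rw [e1, e2]
      rw [pySetD_Wlist n.toNat (k - 1) (k - 1) (by omega) (by omega) le_rfl (by omega)]
      have e3 : k - 1 + 1 = k := by ring
      rw [e3]
      by_cases hlt : PySem.List.pyGetD coords (k - 1) 0 - PySem.List.pyGetD coords (k - 2) 0
          < PySem.List.pyGetD coords k 0 - PySem.List.pyGetD coords (k - 1) 0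
      · rw [if_pos hlt]
        rw [pySetD_Wlist_noop n.toNat k (k - 2) (by omega) (by omega)]
        rw [pyMaybeRemove_not_mem _ _ (by rw [PySem.List.mem_pyRange_one]; omega)]
        have := ih (k + 1) (rate + (PySem.List.pyGetD coords (k - 1) 0
          - PySem.List.pyGetD coords (k - 2) 0)) (by omega) (by omega)
        have e4 : k + 1 - 1 = k := by ring
        rw [e4] at this
        rw [ropesAltLoop, dif_pos hkn, if_pos hlt]
        exact this
      · rw [if_neg hlt]
        rw [pySetD_Wlist n.toNat k k (by omega) (by omega) le_rfl (by omega)]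
        rw [pyMaybeRemove_range_head (k + 1) (n + 1) (by omega)]
        have := ih (k + 2) (rate + (PySem.List.pyGetD coords k 0
          - PySem.List.pyGetD coords (k - 1) 0)) (by omega) (by omega)
        have e4 : k + 2 - 1 = k + 1 := by ring
        rw [e4] at this
        have e5 : k + 1 + 1 = k + 2 := by ring
        rw [e5, ropesAltLoop, dif_pos hkn, if_neg hlt]
        exact this
    · rw [hkn, hlast rate, ropesAltLoop, dif_neg (by omega), if_pos rfl]
    · rw [hend k rate hkn, ropesAltLoop, dif_neg (by omega), if_neg (by omega)]

-- ===== VERDICT (by name: the statement is the Claim_ definition above) =====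
theorem ropes_init_W (n : Int) :
    (PySem.List.pyRange 0 n 1).map (fun _ => false) = Wlist n.toNat 0 := by
  rw [PySem.List.pyRange_one]
  unfold Wlist
  rw [List.map_map]
  have : (n - 0).toNat = n.toNat := by omega
  rw [this]
  apply List.map_congr_left
  intro i _
  simp

theorem ropes_spec : Claim_equal_ropes := by
  intro coords n _ hpre
  unfold Spec_ropes ropes ropes_alt
  rcases hpre with hle | ⟨hn2, _⟩
  · rw [if_pos (by omega : n < 2)]
    rw [PySem.List.pyRange_one_eq_nil (by omega : n + 1 ≤ 1), ropesLoop]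
    rw [PySem.List.pyRange_one_eq_nil (by omega : n ≤ 0)]
    simp
  · have hnt : ((n.toNat : Nat) : Int) = n := Int.toNat_of_nonneg (by omega)
    have hget : ∀ j : Int, 1 ≤ j → j ≤ n →
        (ncDict coords n).getD j 0 = PySem.List.pyGetD coords (j - 1) 0 := by
      intro j hj1 hj2
      calc (ncDict coords n).getD j 0
          = (ncDict coords ((n.toNat : Nat) : Int)).getD j 0 := by rw [hnt]
        _ = _ := ncDict_getD coords n.toNat j hj1 (by omega)
    rw [if_neg (by omega : ¬ n < 2)]
    rw [ropes_init_W, PySem.List.pyRange_one_cons (by omega : (1:Int) < n + 1), ropesLoop,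
        Wlist_all _ _ le_rfl, hnt, decide_eq_false (by omega : ¬ n ≤ 0), if_neg (by simp),
        if_neg (by omega : ¬ (2 ≤ (1:Int) ∧ (1:Int) < n)), if_pos rfl]
    have a1 : (1 : Int) - 1 = 0 := by ring
    have a2 : (1 : Int) + 1 = 2 := by ring
    rw [a1, a2]
    rw [pySetD_Wlist_init n.toNat (by omega)]
    rw [pyMaybeRemove_range_head 2 (n + 1) (by omega)]
    rw [hget 2 (by omega) (by omega), hget 1 le_rfl (by omega)]
    have e1 : (2 : Int) - 1 = 1 := by ring
    rw [e1, a1, zero_add]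
    have e3 : (2 : Int) = 3 - 1 := by ring
    have e4 : (2 : Int) + 1 = 3 := by ring
    rw [e4]
    calc ropesLoop (ncDict coords n) n (Wlist n.toNat 2) (PySem.List.pyRange 3 (n + 1) 1)
          (PySem.List.pyGetD coords 1 0 - PySem.List.pyGetD coords 0 0)
        = ropesLoop (ncDict coords n) n (Wlist n.toNat (3 - 1)) (PySem.List.pyRange 3 (n + 1) 1)
          (PySem.List.pyGetD coords 1 0 - PySem.List.pyGetD coords 0 0) := by rw [← e3]
      _ = _ := loop_eq coords n (by omega) (n - 3).toNat 3 _ le_rfl le_rfl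

@[simp] theorem ropes_raises : Claim_raises_ropes := by
  unfold Claim_raises_ropes
  constructor
  · intro coords n _ hr
    unfold Raises_ropes at hr
    unfold Pre_ropes
    omega
  · refine ⟨by decide, by decide, by decide⟩
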